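-- pv_equiv track=rewrite | github.com/eugeneng1150/CS1010s-study | Tutorials_Sem1/Tutorial 4 Abstraction, Decomposition, Integration/code_tut_4.py | symmetric_grid
-- ===== SOURCE A (Python) =====
-- def symmetric_grid(n):
--     string = ""
--     for i in range(n):
--         for j in range(n):
--             if i == j:
--                 string += "*"
--             else:
--                 string += "_"
--         string += "\n"
--     return string
-- ===== SOURCE B (Python) =====
-- def symmetric_grid(n):
--     return "".join("_" * i + "*" + "_" * (n - 1 - i) + "\n" for i in range(n))
-- ===== Notes on version B (the rewrite author's own statement) =====
-- stated objective: simpler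
-- what changed: Replaced the nested per-character loop with its i==j test by a single pass over rows, each row computed directly as '_'*i + '*' + '_'*(n-1-i) + newline and joined.
import Mathlib
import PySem

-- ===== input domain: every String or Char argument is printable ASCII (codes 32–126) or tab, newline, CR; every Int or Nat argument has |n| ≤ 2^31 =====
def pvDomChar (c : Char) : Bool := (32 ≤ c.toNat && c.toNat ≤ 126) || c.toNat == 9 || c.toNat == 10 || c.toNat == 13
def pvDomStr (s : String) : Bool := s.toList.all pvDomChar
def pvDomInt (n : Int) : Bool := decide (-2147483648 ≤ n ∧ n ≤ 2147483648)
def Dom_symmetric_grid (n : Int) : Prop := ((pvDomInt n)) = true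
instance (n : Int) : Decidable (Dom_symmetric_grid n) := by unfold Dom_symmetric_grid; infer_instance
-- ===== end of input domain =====

-- B replaces A's nested per-character loop with one pass over the rows, each row built by
-- string repetition from the known diagonal index (objective: simpler decomposition).

-- ===== PORT A =====
def symmetric_grid (n : Int) : String :=
  (PySem.List.pyRange 0 n 1).foldl (fun string i =>
    ((PySem.List.pyRange 0 n 1).foldl (fun s j =>
        if i == j then s ++ "*" else s ++ "_") string) ++ "\n") ""

-- ===== PORT B =====
def symmetric_grid_alt (n : Int) : String :=
  PySem.Str.join "" ((PySem.List.pyRange 0 n 1).map (fun i =>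
    String.ofList (PySem.List.pyRepeat ['_'] i) ++ "*" ++
    String.ofList (PySem.List.pyRepeat ['_'] (n - 1 - i)) ++ "\n"))

-- ===== PRECONDITION & SPEC =====
def Spec_symmetric_grid (n : Int) (out : String) : Prop := out = symmetric_grid_alt n
instance (n : Int) (out : String) : Decidable (Spec_symmetric_grid n out) := by unfold Spec_symmetric_grid; infer_instance

-- ===== CLAIM (what is proved, stated in full; the proofs are below) =====
def Claim_equal_symmetric_grid : Prop := ∀ (n : Int), Dom_symmetric_grid n → Spec_symmetric_grid n (symmetric_grid n)

-- ===== LEMMAS AND PROOFS =====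

-- characters produced by A's inner loop, as a map over the range
theorem inner_toList (i : Int) (l : List Int) (s : String) :
    (l.foldl (fun s j => if i = j then s ++ "*" else s ++ "_") s).toList
      = s.toList ++ l.map (fun j => if i = j then '*' else '_') := by
  induction l generalizing s with
  | nil => simp
  | cons j t ih =>
    simp only [List.foldl_cons, List.map_cons, ih]
    by_cases h : i = j <;> simp [h]

-- A's inner row for a diagonal index inside the range
theorem row_eq (n i : Int) (h0 : 0 ≤ i) (h1 : i < n) :
    (PySem.List.pyRange 0 n 1).map (fun j => if i = j then '*' else '_')
      = List.replicate i.toNat '_' ++ '*' :: List.replicate (n - 1 - i).toNat '_' := by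
  rw [PySem.List.pyRange_one_append 0 i n h0 (le_of_lt h1),
      PySem.List.pyRange_one_append i (i + 1) n (by omega) (by omega),
      PySem.List.pyRange_one_singleton]
  simp only [List.map_append, List.map_cons, List.map_nil]
  have hl : (PySem.List.pyRange 0 i 1).map (fun j => if i = j then '*' else '_')
      = List.replicate i.toNat '_' := by
    rw [List.map_congr_left (g := fun _ => '_') (fun j hj => by
      rcases PySem.List.mem_pyRange_one.1 hj with ⟨_, hlt⟩
      simp [show i ≠ j by omega])]
    rw [List.map_const']
    congr 1
    rw [PySem.List.length_pyRange_one]; omega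
  have hr : (PySem.List.pyRange (i + 1) n 1).map (fun j => if i = j then '*' else '_')
      = List.replicate (n - 1 - i).toNat '_' := by
    rw [List.map_congr_left (g := fun _ => '_') (fun j hj => by
      rcases PySem.List.mem_pyRange_one.1 hj with ⟨hle, _⟩
      simp [show i ≠ j by omega])]
    rw [List.map_const']
    congr 1
    rw [PySem.List.length_pyRange_one]; omega
  rw [hl, hr]
  simp

-- A's outer loop, as a flatMap of rows
theorem outer_toList (n : Int) (l : List Int) (s : String) :
    ((l.foldl (fun string i =>
        ((PySem.List.pyRange 0 n 1).foldl (fun s j =>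
          if i == j then s ++ "*" else s ++ "_") string) ++ "\n") s)).toList
      = s.toList ++ l.flatMap (fun i =>
          (PySem.List.pyRange 0 n 1).map (fun j => if i = j then '*' else '_') ++ ['\n']) := by
  induction l generalizing s with
  | nil => simp
  | cons i t ih =>
    rw [List.foldl_cons, ih]
    simp only [beq_iff_eq]
    simp [inner_toList, List.flatMap_cons]

-- ''.join over chunks is flatten
theorem join_empty (parts : List (List Char)) :
    PySem.Chars.join [] parts = parts.flatten := by
  induction parts with
  | nil => simp [PySem.Chars.join_nil]
  | cons p rest ih =>
    cases rest with
    | nil => simp [PySem.Chars.join_singleton]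
    | cons q r => rw [PySem.Chars.join_cons_cons]; simp [ih]

-- ===== VERDICT (by name: the statement is the Claim_ definition above) =====
theorem symmetric_grid_spec : Claim_equal_symmetric_grid := by
  intro n _
  unfold Spec_symmetric_grid symmetric_grid symmetric_grid_alt
  apply String.ext
  rw [outer_toList, PySem.Str.toList_join]
  have h0 : ("" : String).toList = [] := rfl
  rw [h0, join_empty]
  simp only [List.flatMap, List.nil_append]
  congr 1
  rw [List.map_map]
  apply List.map_congr_left
  intro i hi
  rcases PySem.List.mem_pyRange_one.1 hi with ⟨hle, hlt⟩
  rw [row_eq n i hle hlt]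
  simp [Function.comp, PySem.List.pyRepeat_singleton]
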